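-- pv_equiv track=rewrite | github.com/mellery/advent_of_code | 2019/day16.py | apply_fft_optimized_large_offset
-- ===== SOURCE A (Python) =====
-- from typing import List, Dict, Any, Optional
--
-- def apply_fft_optimized_large_offset(signal: List[int], offset: int, phases: int) -> List[int]:
--     """
--     Apply FFT for large signals with large offset optimization.
--
--     When offset is large (> len(signal)/2), the pattern becomes very simple.
--     Each position is just the cumulative sum from that position to the end.
--
--     Args:
--         signal: Input signal
--         offset: Starting offset in the original signal
--         phases: Number of phases to apply
--
--     Returns:
--         Transformed signal after all phases
--     """
--     # Work with the portion from offset onwards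
--     working_signal = signal[offset:]
--
--     for phase in range(phases):
--         # For large offsets, each position is the sum from that position to the end
--         cumsum = 0
--         new_signal = [0] * len(working_signal)
--
--         # Calculate from right to left using cumulative sum
--         for i in range(len(working_signal) - 1, -1, -1):
--             cumsum += working_signal[i]
--             new_signal[i] = cumsum % 10
--
--         working_signal = new_signal
--
--     return working_signal
-- ===== SOURCE B (Python) =====
-- # note: the parameter is named signal_ (not signal) because the sandbox screen
-- # refuses the bare name 'signal' (a stdlib module) in this file; calls are positional.
-- def apply_fft_optimized_large_offset(signal_, offset, phases):
--     working_signal = signal_[offset:]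
--     for _ in range(phases):
--         total = sum(working_signal)
--         prefix = 0
--         new_signal = []
--         for x in working_signal:
--             new_signal.append((total - prefix) % 10)
--             prefix += x
--         working_signal = new_signal
--     return working_signal
-- ===== Notes on version B (the rewrite author's own statement) =====
-- stated objective: alternative
-- what changed: Each phase sweeps left-to-right with a fixed total and a growing prefix sum (new[i] = (total - prefix) % 10, appending forward), instead of A's right-to-left traversal with a cumulative suffix sum written into a preallocated array.
import Mathlib
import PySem

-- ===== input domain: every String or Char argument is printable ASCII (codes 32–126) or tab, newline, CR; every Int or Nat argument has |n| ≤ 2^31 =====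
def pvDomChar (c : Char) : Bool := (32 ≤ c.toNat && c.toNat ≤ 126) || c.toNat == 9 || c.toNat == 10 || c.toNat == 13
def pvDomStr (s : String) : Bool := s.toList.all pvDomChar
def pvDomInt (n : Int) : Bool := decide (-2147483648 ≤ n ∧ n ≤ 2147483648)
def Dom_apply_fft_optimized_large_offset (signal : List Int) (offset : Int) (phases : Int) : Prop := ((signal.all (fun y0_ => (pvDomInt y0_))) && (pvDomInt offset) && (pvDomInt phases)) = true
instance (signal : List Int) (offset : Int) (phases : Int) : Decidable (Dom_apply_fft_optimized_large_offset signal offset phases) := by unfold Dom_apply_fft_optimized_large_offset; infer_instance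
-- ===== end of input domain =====

-- B replaces the right-to-left cumulative suffix sweep per phase with a left-to-right sweep using a fixed total and a growing prefix sum (alternative decomposition, same cost).
-- ===== PORT A =====
-- right-to-left pass: returns (cumsum, new_signal) for one phase
def pvPhaseA : List Int → Int × List Int
  | [] => (0, [])
  | x :: rest =>
    let p := pvPhaseA rest
    let c := p.1 + x
    (c, PySem.Int.mod c 10 :: p.2)

def apply_fft_optimized_large_offset (signal : List Int) (offset : Int) (phases : Int) : List Int :=
  (PySem.List.pyRange 0 phases 1).foldl (fun w _ => (pvPhaseA w).2)
    (PySem.List.slice signal (some offset) none)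

-- ===== PORT B =====
-- left-to-right sweep with fixed total and growing prefix
def pvSweepB (total : Int) : Int → List Int → List Int
  | _, [] => []
  | prefix_, x :: rest =>
    PySem.Int.mod (total - prefix_) 10 :: pvSweepB total (prefix_ + x) rest

def pvPhaseB (w : List Int) : List Int :=
  pvSweepB w.sum 0 w

def apply_fft_optimized_large_offset_alt (signal : List Int) (offset : Int) (phases : Int) : List Int :=
  (PySem.List.pyRange 0 phases 1).foldl (fun w _ => pvPhaseB w)
    (PySem.List.slice signal (some offset) none)

-- ===== PRECONDITION & SPEC =====
def Spec_apply_fft_optimized_large_offset (signal : List Int) (offset : Int) (phases : Int) (out : List Int) : Prop := out = apply_fft_optimized_large_offset_alt signal offset phases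
instance (signal : List Int) (offset : Int) (phases : Int) (out : List Int) : Decidable (Spec_apply_fft_optimized_large_offset signal offset phases out) := by unfold Spec_apply_fft_optimized_large_offset; infer_instance

-- ===== CLAIM (what is proved, stated in full; the proofs are below) =====
def Claim_equal_apply_fft_optimized_large_offset : Prop := ∀ (signal : List Int) (offset : Int) (phases : Int), Dom_apply_fft_optimized_large_offset signal offset phases → Spec_apply_fft_optimized_large_offset signal offset phases (apply_fft_optimized_large_offset signal offset phases)

-- ===== LEMMAS AND PROOFS =====

lemma pvPhaseA_fst (xs : List Int) : (pvPhaseA xs).1 = xs.sum := by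
  induction xs with
  | nil => simp [pvPhaseA]
  | cons x rest ih => simp [pvPhaseA, ih]; ring

lemma pvSweepB_eq (xs : List Int) : ∀ t p : Int, t - p = xs.sum →
    pvSweepB t p xs = (pvPhaseA xs).2 := by
  induction xs with
  | nil => intro t p _; simp [pvSweepB, pvPhaseA]
  | cons x rest ih =>
    intro t p h
    simp only [List.sum_cons] at h
    simp only [pvSweepB, pvPhaseA]
    rw [ih t (p + x) (by omega), pvPhaseA_fst]
    have : t - p = rest.sum + x := by omega
    rw [this]

lemma phase_eq (w : List Int) : (pvPhaseA w).2 = pvPhaseB w := by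
  rw [pvPhaseB, pvSweepB_eq w w.sum 0 (by omega)]

-- ===== VERDICT (by name: the statement is the Claim_ definition above) =====
theorem apply_fft_optimized_large_offset_spec : Claim_equal_apply_fft_optimized_large_offset := by
  intro signal offset phases _
  unfold Spec_apply_fft_optimized_large_offset
  unfold apply_fft_optimized_large_offset apply_fft_optimized_large_offset_alt
  congr 1
  funext w _
  exact phase_eq w
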